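-- pv_equiv track=rewrite | github.com/SandraCastilloM/TribuContable | aplicacion.py | generar_frases
-- ===== SOURCE A (Python) =====
-- def generar_frases(texto, max_palabras=3):
--     palabras = texto.split()
--     frases = []
--     for n in range(2, max_palabras + 1):
--         for i in range(len(palabras) - n + 1):
--             frase = ' '.join(palabras[i:i + n])
--             if len(frase) > 5:  # evitar palabras muy cortas como "de la"
--                 frases.append(frase)
--     return frases
-- ===== SOURCE B (Python) =====
-- def generar_frases(texto, max_palabras=3):
--     # Level-by-level: each n-word phrase extends the (n-1)-word phrase at the
--     # same start index, instead of re-slicing and re-joining the word list.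
--     palabras = texto.split()
--     frases = []
--     nivel = palabras  # level 1: the single words themselves
--     for n in range(2, max_palabras + 1):
--         nivel = [nivel[i] + ' ' + palabras[i + n - 1]
--                  for i in range(len(palabras) - n + 1)]
--         frases.extend(f for f in nivel if len(f) > 5)
--     return frases
-- ===== Notes on version B (the rewrite author's own statement) =====
-- stated objective: alternative
-- what changed: B builds each n-gram level incrementally from the previous level's already-joined strings (previous phrase + ' ' + next word) instead of re-slicing the word list and re-joining every window from scratch for each n.
import Mathlib
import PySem

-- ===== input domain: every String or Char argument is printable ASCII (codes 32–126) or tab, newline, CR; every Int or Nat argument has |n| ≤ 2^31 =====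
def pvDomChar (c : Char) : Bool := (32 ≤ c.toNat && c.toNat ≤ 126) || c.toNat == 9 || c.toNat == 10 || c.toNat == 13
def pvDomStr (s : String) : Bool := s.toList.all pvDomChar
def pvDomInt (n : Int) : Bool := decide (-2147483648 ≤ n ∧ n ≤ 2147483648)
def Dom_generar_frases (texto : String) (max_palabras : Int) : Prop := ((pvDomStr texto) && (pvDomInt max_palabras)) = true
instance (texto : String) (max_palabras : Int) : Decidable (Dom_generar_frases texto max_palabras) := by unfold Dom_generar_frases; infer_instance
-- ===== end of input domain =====

-- B builds each phrase level incrementally from the previous level's joined strings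
-- (nivel[i] + ' ' + next word) instead of re-slicing and re-joining the word list per n-gram;
-- objective: alternative decomposition, same asymptotic cost.

-- ===== PORT A =====
def generar_frases (texto : String) (max_palabras : Int) : List String :=
  let palabras := PySem.Str.split₀ texto
  (PySem.List.pyRange 2 (max_palabras + 1) 1).foldl (fun frases n =>
    (PySem.List.pyRange 0 ((palabras.length : Int) - n + 1) 1).foldl (fun frases i =>
      let frase := PySem.Str.join " " (PySem.List.slice palabras (some i) (some (i + n)))
      if 5 < PySem.Str.len frase then frases ++ [frase] else frases) frases) []

-- ===== PORT B =====
def generar_frases_alt (texto : String) (max_palabras : Int) : List String :=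
  let palabras := PySem.Str.split₀ texto
  ((PySem.List.pyRange 2 (max_palabras + 1) 1).foldl (fun st n =>
      let nivel := (PySem.List.pyRange 0 ((palabras.length : Int) - n + 1) 1).map
        (fun i => PySem.List.pyGetD st.2 i "" ++ " " ++ PySem.List.pyGetD palabras (i + n - 1) "")
      (st.1 ++ nivel.filter (fun f => 5 < PySem.Str.len f), nivel))
    (([] : List String), palabras)).1

-- ===== PRECONDITION & SPEC =====
def Spec_generar_frases (texto : String) (max_palabras : Int) (out : List String) : Prop := out = generar_frases_alt texto max_palabras
instance (texto : String) (max_palabras : Int) (out : List String) : Decidable (Spec_generar_frases texto max_palabras out) := by unfold Spec_generar_frases; infer_instance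

-- ===== CLAIM (what is proved, stated in full; the proofs are below) =====
def Claim_equal_generar_frases : Prop := ∀ (texto : String) (max_palabras : Int), Dom_generar_frases texto max_palabras → Spec_generar_frases texto max_palabras (generar_frases texto max_palabras)

-- ===== LEMMAS AND PROOFS =====

-- the phrase filter: keep phrases longer than 5 characters
def pvPred (f : String) : Bool := decide (5 < PySem.Str.len f)

-- the full level of m-word phrases (one per window start)
def pvLvl (p : List String) (m : Nat) : List String :=
  (List.range (p.length + 1 - m)).map (fun i => PySem.Str.join " " ((p.drop i).take m))

-- accumulated result after the levels n = 2 .. M+1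
def pvOut (p : List String) : Nat → List String
  | 0 => []
  | k + 1 => pvOut p k ++ (pvLvl p (k + 2)).filter pvPred

theorem pvCharsJoin_snoc (sep y : List Char) :
    ∀ (l : List (List Char)), l ≠ [] →
      PySem.Chars.join sep (l ++ [y]) = PySem.Chars.join sep l ++ sep ++ y
  | [], h => absurd rfl h
  | [a], _ => by
      simp [PySem.Chars.join_cons_cons, PySem.Chars.join_singleton]
  | a :: b :: t, _ => by
      have ih := pvCharsJoin_snoc sep y (b :: t) (by simp)
      simp only [List.cons_append] at ih ⊢
      rw [PySem.Chars.join_cons_cons, PySem.Chars.join_cons_cons, ih]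
      simp [List.append_assoc]

theorem pvJoin_one (x : String) : PySem.Str.join " " [x] = x := by
  rw [← String.toList_inj]
  simp [PySem.Str.toList_join, PySem.Chars.join_singleton]

theorem pvJoin_snoc (xs : List String) (y : String) (h : xs ≠ []) :
    PySem.Str.join " " (xs ++ [y]) = PySem.Str.join " " xs ++ " " ++ y := by
  rw [← String.toList_inj]
  simp only [PySem.Str.toList_join, String.toList_append, List.map_append, List.map_cons,
    List.map_nil]
  rw [pvCharsJoin_snoc _ _ _ (by simpa using h)]

theorem pvLvl_one (p : List String) : pvLvl p 1 = p := by
  apply List.ext_getElem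
  · simp [pvLvl]
  · intro i h1 h2
    simp only [pvLvl, Nat.add_sub_cancel, List.getElem_map, List.getElem_range]
    rw [List.take_one]
    have : (p.drop i).head? = some p[i] := by
      rw [List.head?_drop]
      simp [List.getElem?_eq_getElem h2]
    rw [this]
    exact pvJoin_one _

theorem pvLvl_getD (p : List String) (m j : Nat) (hj : j < p.length + 1 - m) :
    (pvLvl p m).getD j "" = PySem.Str.join " " ((p.drop j).take m) := by
  simp [pvLvl, List.getD_eq_getElem?_getD, hj]

theorem pvLvl_step (p : List String) (k j : Nat) (hj : j < p.length + 1 - (k + 2)) :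
    PySem.Str.join " " ((p.drop j).take (k + 2)) =
      PySem.Str.join " " ((p.drop j).take (k + 1)) ++ " " ++ p.getD (j + k + 1) "" := by
  have hjk : j + (k + 1) < p.length := by omega
  have hget : (p.drop j)[k + 1]? = some (p.getD (j + k + 1) "") := by
    rw [List.getElem?_drop, List.getElem?_eq_getElem hjk, List.getD_eq_getElem p "" (by omega)]
    have hidx : j + (k + 1) = j + k + 1 := by omega
    exact congrArg some (by simp only [hidx])
  have h2 : (p.drop j).take (k + 2) = (p.drop j).take (k + 1) ++ [p.getD (j + k + 1) ""] := by
    rw [show k + 2 = (k + 1) + 1 from rfl, List.take_add_one, hget]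
    rfl
  rw [h2, pvJoin_snoc]
  intro hnil
  have := congrArg List.length hnil
  simp [List.length_take, List.length_drop] at this
  omega

-- A's inner loop at n = 2 + k appends exactly the filtered (k+2)-word level
theorem pvStepA (p : List String) (k : Nat) (acc : List String) :
    (PySem.List.pyRange 0 ((p.length : Int) - (2 + (k : Int)) + 1) 1).foldl (fun frases i =>
      if 5 < PySem.Str.len (PySem.Str.join " " (PySem.List.slice p (some i) (some (i + (2 + (k : Int))))))
        then frases ++ [PySem.Str.join " " (PySem.List.slice p (some i) (some (i + (2 + (k : Int)))))]
        else frases) acc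
    = acc ++ (pvLvl p (k + 2)).filter pvPred := by
  rw [PySem.List.foldl_append_ite (fun i => 5 < PySem.Str.len
        (PySem.Str.join " " (PySem.List.slice p (some i) (some (i + (2 + (k : Int)))))))
      (fun i => PySem.Str.join " " (PySem.List.slice p (some i) (some (i + (2 + (k : Int))))))]
  congr 1
  have hb : (((p.length : Int) - (2 + (k : Int)) + 1) - 0).toNat = p.length + 1 - (k + 2) := by
    omega
  rw [PySem.List.pyRange_one, hb, List.filter_map, List.map_map]
  have hf : ∀ j : Nat, PySem.Str.join " " (PySem.List.slice p (some ((0 : Int) + (j : Int)))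
      (some ((0 : Int) + (j : Int) + (2 + (k : Int)))))
      = PySem.Str.join " " ((p.drop j).take (k + 2)) := by
    intro j
    rw [show ((0 : Int) + (j : Int)) = ((j : Nat) : Int) by ring]
    rw [show (((j : Nat) : Int) + (2 + (k : Int))) = (((j : Nat) : Int) + ((k + 2 : Nat) : Int))
      by push_cast; ring]
    rw [PySem.List.slice_natCast_add]
  conv_rhs => rw [pvLvl, List.filter_map]
  have h1 : List.filter ((fun x => decide (5 < PySem.Str.len
        (PySem.Str.join " " (PySem.List.slice p (some x) (some (x + (2 + (k : Int)))))))) ∘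
        (fun j : Nat => (0 : Int) + (j : Int))) (List.range (p.length + 1 - (k + 2)))
      = List.filter (pvPred ∘ (fun i => PySem.Str.join " " ((p.drop i).take (k + 2))))
        (List.range (p.length + 1 - (k + 2))) := by
    apply List.filter_congr
    intro j _
    simp only [Function.comp]
    rw [hf j]
    rfl
  rw [h1]
  exact List.map_congr_left fun j _ => hf j

-- B's level update at n = 2 + k turns level k+1 into level k+2
theorem pvStepB (p : List String) (k : Nat) :
    ((PySem.List.pyRange 0 ((p.length : Int) - (2 + (k : Int)) + 1) 1).map
      (fun i => PySem.List.pyGetD (pvLvl p (k + 1)) i "" ++ " " ++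
        PySem.List.pyGetD p (i + (2 + (k : Int)) - 1) ""))
    = pvLvl p (k + 2) := by
  have hb : (((p.length : Int) - (2 + (k : Int)) + 1) - 0).toNat = p.length + 1 - (k + 2) := by
    omega
  rw [PySem.List.pyRange_one, hb, List.map_map]
  conv_rhs => rw [pvLvl]
  apply List.map_congr_left
  intro j hj
  have hj' : j < p.length + 1 - (k + 2) := List.mem_range.mp hj
  simp only [Function.comp]
  rw [show ((0 : Int) + (j : Int)) = ((j : Nat) : Int) by ring]
  rw [show (((j : Nat) : Int) + (2 + (k : Int)) - 1) = ((j + k + 1 : Nat) : Int) by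
    push_cast; ring]
  rw [PySem.List.pyGetD_natCast, PySem.List.pyGetD_natCast]
  rw [pvLvl_getD p (k + 1) j (by omega)]
  rw [show p.getD (j + k + 1) "" = p.getD (j + k + 1) "" from rfl]
  exact (pvLvl_step p k j hj').symm

-- A's outer fold over n = 2 .. M+1
theorem pvFoldA (p : List String) (acc : List String) : ∀ M : Nat,
    ((List.range M).map (fun k : Nat => (2 : Int) + (k : Int))).foldl (fun frases n =>
      (PySem.List.pyRange 0 ((p.length : Int) - n + 1) 1).foldl (fun frases i =>
        if 5 < PySem.Str.len (PySem.Str.join " " (PySem.List.slice p (some i) (some (i + n))))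
          then frases ++ [PySem.Str.join " " (PySem.List.slice p (some i) (some (i + n)))]
          else frases) frases) acc
    = acc ++ pvOut p M
  | 0 => by simp [pvOut]
  | M + 1 => by
      rw [List.range_succ, List.map_append, List.foldl_append, pvFoldA p acc M]
      simp only [List.map_cons, List.map_nil, List.foldl_cons, List.foldl_nil]
      rw [pvStepA p M (acc ++ pvOut p M), pvOut, List.append_assoc]

-- B's outer fold: invariant (result so far, current level)
theorem pvFoldB (p : List String) (acc : List String) : ∀ M : Nat,
    ((List.range M).map (fun k : Nat => (2 : Int) + (k : Int))).foldl (fun st n =>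
      (st.1 ++ ((PySem.List.pyRange 0 ((p.length : Int) - n + 1) 1).map
          (fun i => PySem.List.pyGetD st.2 i "" ++ " " ++ PySem.List.pyGetD p (i + n - 1) "")).filter
          (fun f => 5 < PySem.Str.len f),
        (PySem.List.pyRange 0 ((p.length : Int) - n + 1) 1).map
          (fun i => PySem.List.pyGetD st.2 i "" ++ " " ++ PySem.List.pyGetD p (i + n - 1) "")))
      (acc, pvLvl p 1)
    = (acc ++ pvOut p M, pvLvl p (M + 1))
  | 0 => by simp [pvOut]
  | M + 1 => by
      rw [List.range_succ, List.map_append, List.foldl_append, pvFoldB p acc M]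
      simp only [List.map_cons, List.map_nil, List.foldl_cons, List.foldl_nil]
      rw [pvStepB p M]
      rw [show M + 1 + 1 = M + 2 from rfl, pvOut, List.append_assoc]
      rfl

-- ===== VERDICT (by name: the statement is the Claim_ definition above) =====
theorem generar_frases_spec : Claim_equal_generar_frases := by
  intro texto max_palabras _
  unfold Spec_generar_frases generar_frases generar_frases_alt
  simp only []
  set p := PySem.Str.split₀ texto with hp
  rw [PySem.List.pyRange_one 2 (max_palabras + 1)]
  have hA := pvFoldA p [] (max_palabras + 1 - 2).toNat
  have hB := pvFoldB p [] (max_palabras + 1 - 2).toNat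
  rw [pvLvl_one] at hB
  rw [hA, hB]
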